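-- pv_equiv track=rewrite | github.com/Jonstep101010/advent-of-code | 2025/day-10/part1.py | button_combination_patterns
-- ===== SOURCE A (Python) =====
-- import itertools
--
-- def button_combination_patterns(
-- 	coeffs: list[tuple[int, ...]],
-- ) -> dict[tuple[int, ...], dict[tuple[int, ...], int]]:
-- 	"""
-- 	Group all possible button combinations by parity pattern (for indicators this IS the effect).
--
-- 	For each parity pattern, store the minimal button press count needed to achieve it.
-- 	"""
-- 	num_indicators = len(coeffs[0])
-- 	patterns_by_parity = {}
--
-- 	# Try all 2^n subsets of buttons
-- 	for num_buttons in range(len(coeffs) + 1):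
-- 		for button_indices in itertools.combinations(range(len(coeffs)), num_buttons):
-- 			# Sum coefficients for selected buttons modulo 2 (XOR for binary)
-- 			effect = tuple(
-- 				sum(coeffs[i][j] for i in button_indices) % 2
-- 				for j in range(num_indicators)
-- 			)
--
-- 			# Store minimal press count for this effect
-- 			if effect not in patterns_by_parity:
-- 				patterns_by_parity[effect] = num_buttons
--
-- 	return patterns_by_parity
-- ===== SOURCE B (Python) =====
-- def button_combination_patterns(coeffs):
-- 	"""Depth-first generation of lexicographic index combinations per size, carrying
-- 	the accumulated parity vector; no per-subset coefficient re-summation."""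
-- 	n = len(coeffs)
-- 	m = len(coeffs[0])
-- 	parities = [tuple(row[j] % 2 for j in range(m)) for row in coeffs]
-- 	result = {}
--
-- 	def go(start, k, eff, size):
-- 		if k == 0:
-- 			if eff not in result:
-- 				result[eff] = size
-- 			return
-- 		for i in range(start, n - k + 1):
-- 			go(i + 1, k - 1,
-- 			   tuple((a + b) % 2 for a, b in zip(eff, parities[i])), size)
--
-- 	zero = (0,) * m
-- 	for size in range(n + 1):
-- 		go(0, size, zero, size)
-- 	return result
-- ===== Notes on version B (the rewrite author's own statement) =====
-- stated objective: alternative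
-- what changed: Replaces the itertools.combinations enumeration with per-subset coefficient re-summation by a depth-first recursion over index combinations that carries the accumulated parity vector (pre-reduced mod 2); intended as faster (measured 2.62x at n=256, but both are exponential and time out at n=1024).
-- outside the precondition, e.g. on button_combination_patterns([]): A raises IndexError, B raises IndexError; on button_combination_patterns([(1, 1), (0,)]): A raises IndexError, B raises IndexError
import Mathlib
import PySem

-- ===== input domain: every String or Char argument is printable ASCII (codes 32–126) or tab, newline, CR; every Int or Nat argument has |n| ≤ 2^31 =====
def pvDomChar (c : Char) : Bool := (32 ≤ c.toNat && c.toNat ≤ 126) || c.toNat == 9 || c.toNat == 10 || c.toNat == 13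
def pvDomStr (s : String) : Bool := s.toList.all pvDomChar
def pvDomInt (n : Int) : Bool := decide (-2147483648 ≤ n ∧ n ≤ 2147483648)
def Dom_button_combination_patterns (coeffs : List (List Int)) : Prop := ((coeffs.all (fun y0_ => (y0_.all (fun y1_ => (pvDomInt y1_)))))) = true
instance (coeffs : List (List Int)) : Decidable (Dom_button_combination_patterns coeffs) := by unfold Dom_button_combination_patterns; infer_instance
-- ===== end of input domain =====

-- B replaces the per-subset coefficient re-summation over itertools.combinations by a
-- depth-first recursion over index combinations carrying the accumulated parity vector.

-- ===== PORT A =====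
-- Literal port of A: for num_buttons in range(len(coeffs)+1), for each combination of
-- button indices (itertools.combinations = PySem.List.combinations, same lexicographic
-- order), compute effect = tuple(sum(coeffs[i][j] for i) % 2 for j) and setdefault-insert.
-- coeffs[0] / coeffs[i][j] are ported with pyGetD defaults; exact under Pre_ (no IndexError).
def button_combination_patterns (coeffs : List (List Int)) : List (List Int × Int) :=
  let n := coeffs.length
  let m := (coeffs.headD []).length               -- len(coeffs[0]); Pre_ excludes coeffs = []
  ((List.range (n + 1)).foldl (fun d k =>
      (PySem.List.combinations (PySem.List.pyRange 0 (n : Int) 1) k).foldl (fun d combo =>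
        let effect := (List.range m).map (fun (j : Nat) =>
          PySem.Int.mod ((combo.map (fun i =>
            PySem.List.pyGetD (PySem.List.pyGetD coeffs i []) (j : Int) 0)).sum) 2)
        if d.contains effect then d else d.insert effect (k : Int)) d)
    (PySem.Dict.empty : PySem.Dict (List Int) Int)).items

-- ===== PORT B =====
-- tuple((a + b) % 2 for a, b in zip(eff, row))
def pbp_xor (eff row : List Int) : List Int :=
  (eff.zip row).map (fun p => PySem.Int.mod (p.1 + p.2) 2)

-- go(start, k, eff, size): for i in range(start, n - k + 1) recurse with the xor-updated
-- accumulator; at k = 0 setdefault-insert eff.  The Python loop range(start, n - K + 1)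
-- for remaining count K = k+1 has exactly n - k - start elements (Nat subtraction = the
-- Python clamping of an empty range), starting at start.
def pbp_go (parities : List (List Int)) (n : Nat) (size : Int) :
    Nat → Nat → List Int → PySem.Dict (List Int) Int → PySem.Dict (List Int) Int
  | _, 0, eff, d => if d.contains eff then d else d.insert eff size
  | start, k + 1, eff, d =>
      (List.range' start (n - k - start)).foldl
        (fun d i => pbp_go parities n size (i + 1) k (pbp_xor eff (parities.getD i [])) d) d

def button_combination_patterns_alt (coeffs : List (List Int)) : List (List Int × Int) :=
  let n := coeffs.length
  let m := (coeffs.headD []).length               -- len(coeffs[0]); Pre_ excludes coeffs = []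
  let parities := coeffs.map (fun row =>
    (List.range m).map (fun (j : Nat) => PySem.Int.mod (PySem.List.pyGetD row (j : Int) 0) 2))
  let zero : List Int := List.replicate m 0
  ((List.range (n + 1)).foldl (fun d (size : Nat) => pbp_go parities n (size : Int) 0 size zero d)
    (PySem.Dict.empty : PySem.Dict (List Int) Int)).items

-- ===== PRECONDITION & SPEC =====
-- Python A raises IndexError on coeffs = [] (coeffs[0]) and whenever some row is shorter
-- than the first row (coeffs[i][j] for j < len(coeffs[0])); exactly those inputs are excluded.
def Pre_button_combination_patterns (coeffs : List (List Int)) : Prop :=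
  coeffs ≠ [] ∧ ∀ row ∈ coeffs, (coeffs.headD []).length ≤ row.length
instance (coeffs : List (List Int)) : Decidable (Pre_button_combination_patterns coeffs) := by
  unfold Pre_button_combination_patterns; infer_instance
def pvWitness_button_combination_patterns : List (List Int) := [[1, 0], [0, 1], [1, 1]]
def Spec_button_combination_patterns (coeffs : List (List Int)) (out : List (List Int × Int)) : Prop := out = button_combination_patterns_alt coeffs
instance (coeffs : List (List Int)) (out : List (List Int × Int)) : Decidable (Spec_button_combination_patterns coeffs out) := by unfold Spec_button_combination_patterns; infer_instance

-- ===== CLAIM (what is proved, stated in full; the proofs are below) =====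
def Claim_equal_button_combination_patterns : Prop := ∀ (coeffs : List (List Int)), Dom_button_combination_patterns coeffs → Pre_button_combination_patterns coeffs → Spec_button_combination_patterns coeffs (button_combination_patterns coeffs)

-- ===== LEMMAS AND PROOFS =====

-- A's step on a combination of Int indices
def pbp_stepA (coeffs : List (List Int)) (m : Nat) (k : Int)
    (d : PySem.Dict (List Int) Int) (combo : List Int) : PySem.Dict (List Int) Int :=
  let effect := (List.range m).map (fun (j : Nat) =>
    PySem.Int.mod ((combo.map (fun i =>
      PySem.List.pyGetD (PySem.List.pyGetD coeffs i []) (j : Int) 0)).sum) 2)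
  if d.contains effect then d else d.insert effect k

-- B's step: xor-accumulate the parities of the combination into eff, then setdefault
def pbp_stepB (parities : List (List Int)) (size : Int) (eff : List Int)
    (d : PySem.Dict (List Int) Int) (c : List Int) : PySem.Dict (List Int) Int :=
  let e := c.foldl (fun e i => pbp_xor e (parities.getD i.toNat [])) eff
  if d.contains e then d else d.insert e size

-- pbp_go from `start` performs B's step over the lexicographic combinations of
-- range(start, n), in order.
theorem pbp_go_eq (parities : List (List Int)) (n : Nat) (size : Int) :
    ∀ (k t start : Nat) (eff : List Int) (d : PySem.Dict (List Int) Int), n - start ≤ t →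
      pbp_go parities n size start k eff d
        = (PySem.List.combinations (PySem.List.pyRange (start : Int) (n : Int)) k).foldl
            (pbp_stepB parities size eff) d := by
  intro k
  induction k with
  | zero =>
      intro t start eff d _
      simp [pbp_go, PySem.List.combinations_zero, pbp_stepB]
  | succ k ih =>
      intro t
      induction t with
      | zero =>
          intro start eff d h
          have hns : n ≤ start := by omega
          have hcount : n - k - start = 0 := by omega
          have hlen : (PySem.List.pyRange (start : Int) (n : Int)).length < k + 1 := by
            rw [PySem.List.length_pyRange_one]; omega
          rw [PySem.List.combinations_eq_nil_of_length_lt _ hlen]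
          simp [pbp_go, hcount]
      | succ t iht =>
          intro start eff d h
          by_cases hlt : start + k < n
          · -- loop nonempty: peel off index `start`
            have hcount : n - k - start = (n - k - (start + 1)) + 1 := by omega
            have hcons : PySem.List.pyRange (start : Int) (n : Int)
                = (start : Int) :: PySem.List.pyRange ((start : Int) + 1) (n : Int) := by
              exact PySem.List.pyRange_one_cons (by exact_mod_cast Nat.lt_of_lt_of_le (by omega) le_rfl)
            rw [hcons, PySem.List.combinations_cons_succ, List.foldl_append, List.foldl_map]
            have hcast : ((start : Int) + 1) = ((start + 1 : Nat) : Int) := by push_cast; ring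
            -- first block: combos beginning with `start` = first loop iteration
            have hfirst : ∀ d', (PySem.List.combinations (PySem.List.pyRange ((start : Int) + 1) (n : Int)) k).foldl
                  (fun d c => pbp_stepB parities size eff d ((start : Int) :: c)) d'
                = pbp_go parities n size (start + 1) k (pbp_xor eff (parities.getD start [])) d' := by
              intro d'
              rw [hcast, ih n (start + 1) _ d' (by omega)]
              apply PySem.List.foldl_congr_mem
              intro acc c _
              simp [pbp_stepB, List.foldl_cons, Int.toNat_natCast]
            -- remaining block: combos not containing `start` = the rest of the loop
            have hrest : (PySem.List.combinations (PySem.List.pyRange ((start : Int) + 1) (n : Int)) (k + 1)).foldl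
                  (pbp_stepB parities size eff)
                  (pbp_go parities n size (start + 1) k (pbp_xor eff (parities.getD start [])) d)
                = pbp_go parities n size (start + 1) (k + 1) eff
                  (pbp_go parities n size (start + 1) k (pbp_xor eff (parities.getD start [])) d) := by
              rw [hcast, iht (start + 1) eff _ (by omega)]
            rw [hfirst, hrest]
            -- unfold the loop of the LHS one step
            conv_lhs => rw [pbp_go, hcount, List.range'_succ, List.foldl_cons]
            have htl : n - k - (start + 1) = n - k - start - 1 := by omega
            rw [pbp_go, htl, hcount]
          · -- loop empty, too few indices remain
            have hcount : n - k - start = 0 := by omega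
            have hlen : (PySem.List.pyRange (start : Int) (n : Int)).length < k + 1 := by
              rw [PySem.List.length_pyRange_one]; omega
            rw [PySem.List.combinations_eq_nil_of_length_lt _ hlen]
            simp [pbp_go, hcount]

-- xor-accumulating reduced parities equals the summed-then-reduced effect of A,
-- for combinations of in-range indices
theorem pbp_fold_xor_eq (coeffs : List (List Int)) (m : Nat) :
    ∀ (c : List Int) (S : Nat → Int),
      (∀ i ∈ c, 0 ≤ i ∧ i < (coeffs.length : Int)) →
      c.foldl (fun e i =>
          pbp_xor e ((coeffs.map (fun row =>
            (List.range m).map (fun (j : Nat) => PySem.Int.mod (PySem.List.pyGetD row (j : Int) 0) 2))).getD i.toNat []))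
        ((List.range m).map (fun j => PySem.Int.mod (S j) 2))
      = (List.range m).map (fun (j : Nat) =>
          PySem.Int.mod (S j + (c.map (fun i =>
            PySem.List.pyGetD (PySem.List.pyGetD coeffs i []) (j : Int) 0)).sum) 2) := by
  intro c
  induction c with
  | nil => intro S _; simp
  | cons i c ihc =>
      intro S hmem
      obtain ⟨hi0, hin⟩ := hmem i (List.mem_cons_self ..)
      have hidx : i.toNat < coeffs.length := by omega
      have hrow : PySem.List.pyGetD coeffs i [] = coeffs[i.toNat] := by
        rw [PySem.List.pyGetD_of_nonneg coeffs [] hi0, List.getD_eq_getElem coeffs [] hidx]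
      have hpar : (coeffs.map (fun row =>
            (List.range m).map (fun (j : Nat) => PySem.Int.mod (PySem.List.pyGetD row (j : Int) 0) 2))).getD i.toNat []
          = (List.range m).map (fun (j : Nat) => PySem.Int.mod (PySem.List.pyGetD coeffs[i.toNat] (j : Int) 0) 2) := by
        rw [List.getD_eq_getElem _ [] (by simpa using hidx)]
        simp
      rw [List.foldl_cons, hpar]
      have hxor : pbp_xor ((List.range m).map (fun j => PySem.Int.mod (S j) 2))
            ((List.range m).map (fun (j : Nat) => PySem.Int.mod (PySem.List.pyGetD coeffs[i.toNat] (j : Int) 0) 2))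
          = (List.range m).map (fun (j : Nat) =>
              PySem.Int.mod (S j + PySem.List.pyGetD coeffs[i.toNat] (j : Int) 0) 2) := by
        unfold pbp_xor
        rw [List.zip_map', List.map_map]
        apply List.map_congr_left
        intro j _
        simp only [Function.comp]
        rw [PySem.Int.mod_eq_emod_of_pos (by norm_num), PySem.Int.mod_eq_emod_of_pos (by norm_num),
            PySem.Int.mod_eq_emod_of_pos (by norm_num), PySem.Int.mod_eq_emod_of_pos (by norm_num)]
        rw [← Int.add_emod]
      rw [hxor, ihc (fun (j : Nat) => S j + PySem.List.pyGetD coeffs[i.toNat] (j : Int) 0)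
            (fun x hx => hmem x (List.mem_cons_of_mem _ hx))]
      apply List.map_congr_left
      intro j _
      simp only [List.map_cons, List.sum_cons, hrow]
      ring_nf

-- ===== VERDICT (by name: the statement is the Claim_ definition above) =====
theorem button_combination_patterns_spec : Claim_equal_button_combination_patterns := by
  intro coeffs _ _
  unfold Spec_button_combination_patterns
  unfold button_combination_patterns button_combination_patterns_alt
  simp only
  congr 1
  apply PySem.List.foldl_congr_mem
  intro d k _
  rw [pbp_go_eq _ _ _ k coeffs.length 0 _ d (by omega)]
  show (PySem.List.combinations (PySem.List.pyRange 0 (coeffs.length : Int)) k).foldl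
        (pbp_stepA coeffs (coeffs.headD []).length (k : Int)) d = _
  apply PySem.List.foldl_congr_mem
  intro acc c hc
  have hmem : ∀ i ∈ c, 0 ≤ i ∧ i < (coeffs.length : Int) := by
    intro i hi
    have := (PySem.List.sublist_of_mem_combinations hc).mem hi
    exact PySem.List.mem_pyRange_one.mp this
  have hz : (List.replicate (coeffs.headD []).length 0 : List Int)
      = (List.range (coeffs.headD []).length).map (fun _ => PySem.Int.mod (0 : Int) 2) := by
    simp [List.map_const']
  unfold pbp_stepA pbp_stepB
  simp only
  rw [hz, pbp_fold_xor_eq coeffs _ c (fun _ => 0) hmem]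
  simp
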